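-- pv_equiv track=rewrite | github.com/achobgood/wxops | src/wxcli/migration/transform/cross_reference.py | _match_description_to_user
-- ===== SOURCE A (Python) =====
-- def _match_description_to_user(
--     description: str, user_lookup: dict[str, str]
-- ) -> str | None:
--     """Try to match a device description to a user.
--
--     Tries exact match first, then checks if any user key appears as a
--     substring in the description (handles "Adam McKenzie - 8845" style).
--     """
--     if not description:
--         return None
--     desc_lower = description.lower().strip()
--
--     # Exact match
--     if desc_lower in user_lookup:
--         return user_lookup[desc_lower]
--
--     # Substring match — check if a user's full name appears in the description
--     # Only match on names with 2+ parts to avoid false positives on short strings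
--     best_match: str | None = None
--     best_len = 0
--     for key, cid in user_lookup.items():
--         if len(key) < 4 or " " not in key:
--             continue  # Skip short keys and single-word keys for substring matching
--         if key in desc_lower and len(key) > best_len:
--             best_match = cid
--             best_len = len(key)
--
--     return best_match
-- ===== SOURCE B (Python) =====
-- def _match_description_to_user(description, user_lookup):
--     """Same result as A: exact match first, then, instead of a running
--     argmax loop, collect every multi-word key (len >= 4) occurring in the
--     description and return the value of the longest one (stable sort keeps
--     dict order on length ties, matching A's strict-'>' accumulator)."""
--     if not description:
--         return None
--     desc_lower = description.lower().strip()
--     if desc_lower in user_lookup: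
--         return user_lookup[desc_lower]
--     hits = [(key, cid) for key, cid in user_lookup.items()
--             if len(key) >= 4 and " " in key and key in desc_lower]
--     ranked = sorted(hits, key=lambda kv: -len(kv[0]))
--     return ranked[0][1] if ranked else None
-- ===== Notes on version B (the rewrite author's own statement) =====
-- stated objective: alternative
-- what changed: Replaces A's single-pass running-argmax loop (best_match/best_len accumulators with skip guards) by a declarative pipeline: filter the matching multi-word keys into a candidate list, stable-sort it by descending key length, and return the head's value.
import Mathlib
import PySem

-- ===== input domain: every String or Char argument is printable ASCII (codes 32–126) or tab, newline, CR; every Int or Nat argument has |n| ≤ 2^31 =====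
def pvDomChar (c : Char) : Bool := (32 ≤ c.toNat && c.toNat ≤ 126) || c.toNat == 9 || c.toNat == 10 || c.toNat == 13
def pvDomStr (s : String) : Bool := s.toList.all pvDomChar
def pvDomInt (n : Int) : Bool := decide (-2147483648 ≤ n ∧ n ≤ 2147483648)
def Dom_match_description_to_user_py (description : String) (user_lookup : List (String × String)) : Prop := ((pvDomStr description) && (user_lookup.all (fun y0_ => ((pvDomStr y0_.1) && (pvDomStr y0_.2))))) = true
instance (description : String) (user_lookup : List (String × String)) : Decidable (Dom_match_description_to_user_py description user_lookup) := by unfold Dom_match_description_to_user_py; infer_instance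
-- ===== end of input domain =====

-- B replaces A's running-argmax accumulator loop by filter + stable sort by descending key length + head; same result, no speed claim.


-- ===== PORT A =====
def match_description_to_user_py (description : String) (user_lookup : List (String × String)) : Option String :=
  if description = "" then none
  else
    let d := PySem.Dict.ofList user_lookup
    let descLower := PySem.Str.strip (PySem.Str.lower description)
    match d.get? descLower with
    | some cid => some cid
    | none =>
      (d.items.foldl (fun (s : Option String × Int) kv =>
          if decide (PySem.Str.len kv.1 < 4) || !(PySem.Str.isIn " " kv.1) then s
          else if PySem.Str.isIn kv.1 descLower && decide (s.2 < PySem.Str.len kv.1) then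
            (some kv.2, PySem.Str.len kv.1)
          else s) (none, 0)).1

-- ===== PORT B =====
def match_description_to_user_py_alt (description : String) (user_lookup : List (String × String)) : Option String :=
  if description = "" then none
  else
    let d := PySem.Dict.ofList user_lookup
    let descLower := PySem.Str.strip (PySem.Str.lower description)
    match d.get? descLower with
    | some cid => some cid
    | none =>
      let hits := d.items.filter (fun kv =>
        decide (4 ≤ PySem.Str.len kv.1) && PySem.Str.isIn " " kv.1 && PySem.Str.isIn kv.1 descLower)
      match PySem.List.sorted hits (fun kv => -(PySem.Str.len kv.1)) false with
      | [] => none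
      | kv :: _ => some kv.2

-- ===== PRECONDITION & SPEC =====
def Spec_match_description_to_user_py (description : String) (user_lookup : List (String × String)) (out : Option String) : Prop := out = match_description_to_user_py_alt description user_lookup
instance (description : String) (user_lookup : List (String × String)) (out : Option String) : Decidable (Spec_match_description_to_user_py description user_lookup out) := by unfold Spec_match_description_to_user_py; infer_instance

-- ===== CLAIM (what is proved, stated in full; the proofs are below) =====
def Claim_equal_match_description_to_user_py : Prop := ∀ (description : String) (user_lookup : List (String × String)), Dom_match_description_to_user_py description user_lookup → Spec_match_description_to_user_py description user_lookup (match_description_to_user_py description user_lookup)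

-- ===== LEMMAS AND PROOFS =====

-- first-minimum step: how the head of a stable insertion sort evolves
def pvStep (key : String × String → Int) (m : Option (String × String)) (x : String × String) : Option (String × String) :=
  match m with
  | none => some x
  | some m' => if key x < key m' then some x else some m'

lemma head_insertBy (key : String × String → Int) (x : String × String) (acc : List (String × String)) :
    (PySem.List.insertBy (fun a b => decide (key a < key b)) x acc).head? = pvStep key acc.head? x := by
  cases acc with
  | nil => rfl
  | cons y t =>
    simp only [PySem.List.insertBy, pvStep, List.head?]
    by_cases h : key x < key y <;> simp [h]

lemma head_foldl_insertBy (key : String × String → Int) (xs : List (String × String)) :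
    ∀ acc : List (String × String),
      (xs.foldl (fun acc x => PySem.List.insertBy (fun a b => decide (key a < key b)) x acc) acc).head?
        = xs.foldl (pvStep key) acc.head? := by
  induction xs with
  | nil => intro acc; rfl
  | cons x t ih =>
    intro acc
    simp only [List.foldl_cons]
    rw [ih, head_insertBy]

-- head of Python's stable sort = result of the first-minimum scan
lemma head_sorted (key : String × String → Int) (xs : List (String × String)) :
    (PySem.List.sorted xs key false).head? = xs.foldl (pvStep key) none := by
  rw [PySem.List.sorted_eq_foldl_insertBy]
  exact head_foldl_insertBy key xs []

-- pack an Option candidate into A's (best_match, best_len) state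
def pvPack (r : Option (String × String)) : Option String × Int :=
  (r.map Prod.snd, match r with | none => 0 | some kv => PySem.Str.len kv.1)

-- A's guarded running-argmax fold equals the first-minimum scan (key = -len) over the keys passing B's filter
lemma foldA_eq_scan (desc : String) (xs : List (String × String)) :
    ∀ acc : Option (String × String),
      xs.foldl (fun (s : Option String × Int) kv =>
          if decide (PySem.Str.len kv.1 < 4) || !(PySem.Str.isIn " " kv.1) then s
          else if PySem.Str.isIn kv.1 desc && decide (s.2 < PySem.Str.len kv.1) then
            (some kv.2, PySem.Str.len kv.1)
          else s) (pvPack acc)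
      = pvPack ((xs.filter (fun kv =>
            decide (4 ≤ PySem.Str.len kv.1) && PySem.Str.isIn " " kv.1 && PySem.Str.isIn kv.1 desc)).foldl
          (pvStep (fun kv => -(PySem.Str.len kv.1))) acc) := by
  induction xs with
  | nil => intro acc; rfl
  | cons x t ih =>
    intro acc
    simp only [List.foldl_cons, List.filter_cons]
    by_cases h4 : PySem.Str.len x.1 < 4
    · rw [decide_eq_true h4, decide_eq_false (by omega : ¬ (4 ≤ PySem.Str.len x.1))]
      simp only [Bool.true_or, Bool.false_and, Bool.false_eq_true, if_false,
        if_true]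
      exact ih acc
    · rw [decide_eq_false h4, decide_eq_true (by omega : 4 ≤ PySem.Str.len x.1)]
      simp only [Bool.false_or, Bool.true_and]
      cases hsp : PySem.Str.isIn " " x.1 with
      | false =>
        simp only [Bool.not_false, Bool.false_and, Bool.false_eq_true, if_false,
          if_true]
        exact ih acc
      | true =>
        simp only [Bool.not_true, Bool.false_eq_true, if_false, Bool.true_and]
        cases hin : PySem.Str.isIn x.1 desc with
        | false =>
          simp only [Bool.false_and, Bool.false_eq_true, if_false]
          exact ih acc
        | true =>
          simp only [Bool.true_and, if_true]
          have hstate : (if (decide ((pvPack acc).2 < PySem.Str.len x.1)) = true then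
                ((some x.2 : Option String), PySem.Str.len x.1) else pvPack acc)
              = pvPack (pvStep (fun kv => -(PySem.Str.len kv.1)) acc x) := by
            cases acc with
            | none =>
              rw [decide_eq_true (show (pvPack (none : Option (String × String))).2 < PySem.Str.len x.1 by
                    simp only [pvPack]; omega)]
              rfl
            | some m =>
              simp only [pvPack, pvStep]
              split_ifs with h1 h2 h2
              · rfl
              · exfalso; have h1' := of_decide_eq_true h1; omega
              · exfalso
                have h1' : ¬ (PySem.Str.len m.1 < PySem.Str.len x.1) :=
                  fun h => h1 (decide_eq_true h)
                omega
              · rfl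
          rw [hstate]
          exact ih _

-- ===== VERDICT (by name: the statement is the Claim_ definition above) =====
theorem match_description_to_user_py_spec : Claim_equal_match_description_to_user_py := by
  intro description user_lookup _hdom
  unfold Spec_match_description_to_user_py match_description_to_user_py match_description_to_user_py_alt
  by_cases hempty : description = ""
  · simp [hempty]
  · simp only [hempty, if_false]
    set d := PySem.Dict.ofList user_lookup
    set descLower := PySem.Str.strip (PySem.Str.lower description)
    cases hget : d.get? descLower with
    | some cid => rfl
    | none =>
      simp only []
      have := foldA_eq_scan descLower d.items none
      simp only [pvPack, Option.map_none] at this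
      rw [this, ← head_sorted]
      cases PySem.List.sorted (d.items.filter (fun kv =>
          decide (4 ≤ PySem.Str.len kv.1) && PySem.Str.isIn " " kv.1 && PySem.Str.isIn kv.1 descLower))
          (fun kv => -(PySem.Str.len kv.1)) false with
      | nil => rfl
      | cons kv t => rfl
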